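-- pv_equiv track=rewrite | github.com/haimbar/RNA_lexis | src/rna_lexis/algorithms.py | count_kgrams
-- ===== SOURCE A (Python) =====
-- from collections import Counter, defaultdict
--
-- def count_kgrams(s: str, k: int, skip='_', at_least=2, return_sorted=True, rev=False) -> dict:
--     """Count all k-length substrings (k-grams) in s.
--
--     Args:
--         s:            Input string.
--         k:            Substring length to count.
--         skip:         Separator character; any k-gram that contains this
--                       character is excluded from the count (default ``'_'``).
--         at_least:     Minimum occurrence count for a k-gram to be included in
--                       the result (default 2).
--         return_sorted: When True (default), the returned dict is sorted by
--                        count in descending order (most frequent first).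
--         rev:          When True, sort in ascending order instead of descending.
--                       Has no effect when return_sorted is False.
--
--     Returns:
--         Dict mapping k-gram string → count, filtered to entries with count
--         >= at_least and optionally sorted by count.
--     """
--     counter = Counter(
--         s[j:j+k] for j in range(len(s) - k + 1)
--         if skip not in s[j:j+k]
--     )
--     kgrams = {key: val for key, val in counter.items() if val >= at_least}
--     if return_sorted:
--         kgrams = {k: v for k, v in sorted(kgrams.items(), key=lambda item: item[1], reverse=rev)}
--     return(kgrams)
-- ===== SOURCE B (Python) =====
-- def count_kgrams(s: str, k: int, skip='_', at_least=2, return_sorted=True, rev=False) -> dict: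
--     """Count k-grams of s that contain no occurrence of skip, deciding each
--     window with a prefix-sum table of skip occurrences instead of re-scanning
--     the window for skip."""
--     if k < 1:
--         return {}
--     n, m = len(s), len(skip)
--     occ = [0]  # occ[i] = number of occurrences of skip starting before position i
--     t = 0
--     for p in range(n + 1):
--         if s[p:p + m] == skip:
--             t += 1
--         occ.append(t)
--     counts = {}
--     for j in range(n - k + 1):
--         if occ[max(j + k - m + 1, j)] > occ[j]:
--             continue  # an occurrence of skip starts inside the window
--         g = s[j:j + k]
--         counts[g] = counts.get(g, 0) + 1
--     kgrams = {g: c for g, c in counts.items() if c >= at_least}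
--     if return_sorted:
--         kgrams = dict(sorted(kgrams.items(), key=lambda it: it[1], reverse=rev))
--     return kgrams
-- ===== Notes on version B (the rewrite author's own statement) =====
-- stated objective: alternative
-- what changed: B precomputes once a prefix-sum table of the positions where skip occurs in s and decides each window by one table comparison, instead of A's per-window substring-containment scan.
-- intended difference: For k <= 0 with nonempty skip and at_least no larger than the number of degenerate windows, A counts the empty string (and wrapped slices) produced by Python slicing as k-grams and returns e.g. {'': len(s)+1}; B returns {} because there are no k-grams of nonpositive length, which is the intended value. — e.g. on count_kgrams("ab", 0, "_", 2, true, false): A returns [("", 3)], B returns []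
import Mathlib
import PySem

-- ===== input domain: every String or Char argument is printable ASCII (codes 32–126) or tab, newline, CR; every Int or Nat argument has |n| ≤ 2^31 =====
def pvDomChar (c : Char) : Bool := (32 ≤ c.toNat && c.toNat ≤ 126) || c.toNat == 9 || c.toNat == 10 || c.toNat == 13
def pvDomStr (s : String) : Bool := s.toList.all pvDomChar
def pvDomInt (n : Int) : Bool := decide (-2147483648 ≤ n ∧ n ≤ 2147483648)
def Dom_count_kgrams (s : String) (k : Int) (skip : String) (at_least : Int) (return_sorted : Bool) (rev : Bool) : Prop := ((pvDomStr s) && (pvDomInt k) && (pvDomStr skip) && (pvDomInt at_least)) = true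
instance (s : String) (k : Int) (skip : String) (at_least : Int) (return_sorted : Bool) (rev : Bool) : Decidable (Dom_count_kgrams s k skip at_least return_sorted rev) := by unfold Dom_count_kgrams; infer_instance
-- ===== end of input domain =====

-- B replaces A's per-window substring scan by a prefix-sum table of skip occurrences (objective: alternative algorithm).

-- ===== PORT A =====
def count_kgrams (s : String) (k : Int) (skip : String) (at_least : Int) (return_sorted : Bool) (rev : Bool) : List (String × Int) :=
  -- Counter(s[j:j+k] for j in range(len(s)-k+1) if skip not in s[j:j+k])
  let counter := PySem.Dict.counter
    (((PySem.List.pyRange 0 (PySem.Str.len s - k + 1) 1).filter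
        (fun j => !(PySem.Str.isIn skip (PySem.Str.slice s (some j) (some (j + k)))))).map
      (fun j => PySem.Str.slice s (some j) (some (j + k))))
  -- {key: val for key, val in counter.items() if val >= at_least}
  let kgrams := counter.items.filter (fun p => decide (at_least ≤ p.2))
  -- optional sort by count
  if return_sorted then PySem.List.sorted kgrams (fun p => p.2) rev else kgrams

-- ===== PORT B =====
def count_kgrams_alt (s : String) (k : Int) (skip : String) (at_least : Int) (return_sorted : Bool) (rev : Bool) : List (String × Int) :=
  if k < 1 then []   -- no k-grams of nonpositive length
  else
    let n : Int := PySem.Str.len s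
    let m : Int := PySem.Str.len skip
    -- occ[i] = number of occurrences of skip starting at a position < i
    let pt := (PySem.List.pyRange 0 (n + 1) 1).foldl
      (fun (st : List Int × Int) p =>
        let t := if PySem.Str.slice s (some p) (some (p + m)) = skip then st.2 + 1 else st.2
        (st.1 ++ [t], t)) ([0], 0)
    let occ := pt.1
    let counts := (PySem.List.pyRange 0 (n - k + 1) 1).foldl
      (fun (d : PySem.Dict String Int) j =>
        if PySem.List.pyGetD occ j 0 < PySem.List.pyGetD occ (max (j + k - m + 1) j) 0 then d
          -- an occurrence of skip starts inside the window
        else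
          let g := PySem.Str.slice s (some j) (some (j + k))
          d.insert g (d.getD g 0 + 1)) PySem.Dict.empty
    let kgrams := counts.items.filter (fun p => decide (at_least ≤ p.2))
    if return_sorted then PySem.List.sorted kgrams (fun p => p.2) rev else kgrams

-- ===== PRECONDITION & SPEC =====
-- For k ≤ 0 with nonempty skip and at_least not above the number of degenerate windows, A counts
-- the empty string (and wrapped slices) produced by Python slicing as k-grams and returns e.g.
-- {'': len(s)+1}; B returns {} because there are no k-grams of nonpositive length, the intended value.
def D_count_kgrams (s : String) (k : Int) (skip : String) (at_least : Int) (return_sorted : Bool) (rev : Bool) : Prop :=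
  k ≤ 0 ∧ skip ≠ "" ∧
    ((0 < PySem.Str.len s + k ∧ at_least ≤ PySem.Str.len s + 1) ∨
     (PySem.Str.len s + k ≤ 0 ∧ at_least ≤ PySem.Str.len s - k + 1))
instance (s : String) (k : Int) (skip : String) (at_least : Int) (return_sorted : Bool) (rev : Bool) : Decidable (D_count_kgrams s k skip at_least return_sorted rev) := by unfold D_count_kgrams; infer_instance

def Spec_count_kgrams (s : String) (k : Int) (skip : String) (at_least : Int) (return_sorted : Bool) (rev : Bool) (out : List (String × Int)) : Prop := ¬ D_count_kgrams s k skip at_least return_sorted rev → out = count_kgrams_alt s k skip at_least return_sorted rev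
instance (s : String) (k : Int) (skip : String) (at_least : Int) (return_sorted : Bool) (rev : Bool) (out : List (String × Int)) : Decidable (Spec_count_kgrams s k skip at_least return_sorted rev out) := by unfold Spec_count_kgrams; infer_instance

def pvDiffWitness_count_kgrams : String × Int × String × Int × Bool × Bool := ("ab", 0, "_", 2, true, false)
def pvDiffWitnessOut_count_kgrams : (List (String × Int)) × (List (String × Int)) := ([("", 3)], [])

-- ===== CLAIM (what is proved, stated in full; the proofs are below) =====
def Claim_unchanged_count_kgrams : Prop := ∀ (s : String) (k : Int) (skip : String) (at_least : Int) (return_sorted : Bool) (rev : Bool), Dom_count_kgrams s k skip at_least return_sorted rev → Spec_count_kgrams s k skip at_least return_sorted rev (count_kgrams s k skip at_least return_sorted rev)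
def Claim_changed_count_kgrams : Prop := Dom_count_kgrams (pvDiffWitness_count_kgrams.1) (pvDiffWitness_count_kgrams.2.1) (pvDiffWitness_count_kgrams.2.2.1) (pvDiffWitness_count_kgrams.2.2.2.1) (pvDiffWitness_count_kgrams.2.2.2.2.1) (pvDiffWitness_count_kgrams.2.2.2.2.2) ∧ D_count_kgrams (pvDiffWitness_count_kgrams.1) (pvDiffWitness_count_kgrams.2.1) (pvDiffWitness_count_kgrams.2.2.1) (pvDiffWitness_count_kgrams.2.2.2.1) (pvDiffWitness_count_kgrams.2.2.2.2.1) (pvDiffWitness_count_kgrams.2.2.2.2.2) ∧ count_kgrams (pvDiffWitness_count_kgrams.1) (pvDiffWitness_count_kgrams.2.1) (pvDiffWitness_count_kgrams.2.2.1) (pvDiffWitness_count_kgrams.2.2.2.1) (pvDiffWitness_count_kgrams.2.2.2.2.1) (pvDiffWitness_count_kgrams.2.2.2.2.2) = pvDiffWitnessOut_count_kgrams.1 ∧ count_kgrams_alt (pvDiffWitness_count_kgrams.1) (pvDiffWitness_count_kgrams.2.1) (pvDiffWitness_count_kgrams.2.2.1) (pvDiffWitness_count_kgrams.2.2.2.1)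 (pvDiffWitness_count_kgrams.2.2.2.2.1) (pvDiffWitness_count_kgrams.2.2.2.2.2) = pvDiffWitnessOut_count_kgrams.2 ∧ pvDiffWitnessOut_count_kgrams.1 ≠ pvDiffWitnessOut_count_kgrams.2
def Claim_exact_count_kgrams : Prop := ∀ (s : String) (k : Int) (skip : String) (at_least : Int) (return_sorted : Bool) (rev : Bool), Dom_count_kgrams s k skip at_least return_sorted rev → D_count_kgrams s k skip at_least return_sorted rev → count_kgrams s k skip at_least return_sorted rev ≠ count_kgrams_alt s k skip at_least return_sorted rev

-- ===== LEMMAS AND PROOFS =====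

-- number of occurrences of t starting at a position < i in cs
def pvCnt (cs t : List Char) (i : Nat) : Int :=
  ((List.range i).countP (fun p => (cs.drop p).take t.length == t) : Nat)

theorem pvCnt_nil (cs : List Char) (i : Nat) : pvCnt cs [] i = i := by
  simp [pvCnt]

-- B's occurrence test at position p, as a fact about lists
theorem pv_occ_eq (s skip : String) (p : Nat) :
    (PySem.Str.slice s (some (p:Int)) (some ((p:Int) + PySem.Str.len skip)) = skip)
      ↔ ((s.toList.drop p).take skip.toList.length = skip.toList) := by
  rw [PySem.Str.len_eq, PySem.Str.slice]
  rw [show ((p:Int) + (skip.toList.length : Int)) = ((p + skip.toList.length : Nat) : Int) by push_cast; ring]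
  show String.ofList (PySem.List.slice s.toList _ _) = skip ↔ _
  rw [PySem.List.slice_natCast, Nat.add_sub_cancel_left]
  constructor
  · intro h; rw [← h]; simp
  · intro h; rw [h, String.ofList_toList]

-- the prefix-sum fold of B computes pvCnt
theorem pv_pre_fold (s skip : String) (N : Nat) :
    (PySem.List.pyRange 0 (N : Int) 1).foldl
      (fun (st : List Int × Int) p =>
        let t := if PySem.Str.slice s (some p) (some (p + PySem.Str.len skip)) = skip then st.2 + 1 else st.2
        (st.1 ++ [t], t)) ([0], 0)
    = ((List.range (N + 1)).map (fun h => pvCnt s.toList skip.toList h), pvCnt s.toList skip.toList N) := by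
  induction N with
  | zero => simp [PySem.List.pyRange_one_eq_nil, pvCnt]
  | succ N ih =>
    rw [show ((N + 1 : Nat) : Int) = (N : Int) + 1 by push_cast; ring,
        PySem.List.pyRange_one_succ_right (by positivity), List.foldl_append, ih]
    simp only [List.foldl_cons, List.foldl_nil]
    have hocc := pv_occ_eq s skip N
    have hcnt : pvCnt s.toList skip.toList (N + 1)
        = if PySem.Str.slice s (some (N:Int)) (some ((N:Int) + PySem.Str.len skip)) = skip
          then pvCnt s.toList skip.toList N + 1 else pvCnt s.toList skip.toList N := by
      simp only [pvCnt, List.range_succ, List.countP_append, List.countP_cons, List.countP_nil]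
      by_cases h : (s.toList.drop N).take skip.toList.length = skip.toList
      · rw [if_pos (hocc.mpr h)]; simp; simpa using h
      · rw [if_neg (fun hc => h (hocc.mp hc))]; simp; simpa using h
    rw [show N + 1 + 1 = (N + 1) + 1 from rfl, List.range_succ (n := N + 1), List.map_append, hcnt]
    simp only [List.map_cons, List.map_nil, hcnt]

-- reading B's occ table
theorem pv_pre_get (s skip : String) (N : Nat) (i : Int) (h0 : 0 ≤ i) (hN : i ≤ (N : Int)) :
    PySem.List.pyGetD ((List.range (N + 1)).map (fun h => pvCnt s.toList skip.toList h)) i 0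
      = pvCnt s.toList skip.toList i.toNat := by
  rw [PySem.List.pyGetD_of_nonneg _ _ h0]
  have hi : i.toNat < N + 1 := by omega
  rw [List.getD_eq_getElem?_getD, List.getElem?_map, List.getElem?_range hi]
  rfl

-- a prefix-sum difference is positive iff an occurrence starts in the interval
theorem pv_cnt_lt_iff (cs t : List Char) (a b : Nat) (hab : a ≤ b) :
    pvCnt cs t a < pvCnt cs t b ↔ ∃ p : Nat, a ≤ p ∧ p < b ∧ (cs.drop p).take t.length = t := by
  unfold pvCnt
  rw [show b = a + (b - a) by omega, List.range_add, List.countP_append]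
  rw [Nat.cast_add]
  constructor
  · intro h
    have hpos : 0 < ((List.range (b - a)).map (fun x => a + x)).countP
        (fun p => (cs.drop p).take t.length == t) := by
      by_contra hc
      omega
    obtain ⟨x, hx, hxp⟩ := List.countP_pos_iff.mp hpos
    obtain ⟨y, hy, rfl⟩ := List.mem_map.mp hx
    exact ⟨a + y, by omega, by have := List.mem_range.mp hy; omega, by simpa using hxp⟩
  · intro ⟨p, hap, hpb, hocc⟩
    have hpos : 0 < ((List.range (b - a)).map (fun x => a + x)).countP
        (fun p => (cs.drop p).take t.length == t) := by
      apply List.countP_pos_iff.mpr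
      exact ⟨p, List.mem_map.mpr ⟨p - a, List.mem_range.mpr (by omega), by omega⟩, by simpa using hocc⟩
    omega

-- t occurs in the clamped window (cs.drop a).take (b - a) iff it starts at some p with a ≤ p, p + |t| ≤ b
theorem pv_infix_window (cs t : List Char) (ht : t ≠ []) (a b : Nat) :
    t <:+: (cs.drop a).take (b - a) ↔
      ∃ p : Nat, a ≤ p ∧ p + t.length ≤ b ∧ (cs.drop p).take t.length = t := by
  have hlen : 0 < t.length := List.length_pos_iff.mpr ht
  constructor
  · rintro ⟨pre, suf, hw⟩
    refine ⟨a + pre.length, by omega, ?_, ?_⟩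
    · have hl : pre.length + t.length ≤ b - a := by
        have := congrArg List.length hw
        simp at this
        omega
      omega
    · have hdrop : ((cs.drop a).take (b - a)).drop pre.length = t ++ suf := by
        rw [← hw]; simp
      rw [List.drop_take, List.drop_drop] at hdrop
      have hpre : t <+: (cs.drop (a + pre.length)).take (b - a - pre.length) := by
        rw [hdrop]; exact List.prefix_append t suf
      rw [List.prefix_take_iff] at hpre
      exact (List.prefix_iff_eq_take.mp hpre.1).symm
  · rintro ⟨p, hap, hpb, hocc⟩
    have hbcs : t <+: (cs.drop p).take t.length := by
      rw [hocc]
    have hpre : t <+: cs.drop p := hbcs.trans (List.take_prefix _ _)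
    have hwin : t <+: ((cs.drop a).take (b - a)).drop (p - a) := by
      rw [List.drop_take, List.drop_drop, show a + (p - a) = p by omega]
      rw [List.prefix_take_iff]
      exact ⟨hpre, by omega⟩
    obtain ⟨suf, hsuf⟩ := hwin
    exact ⟨((cs.drop a).take (b - a)).take (p - a), suf, by
      rw [List.append_assoc, hsuf, List.take_append_drop]⟩

-- A's substring test agrees with B's table test on every window start j of the loop, for k ≥ 1
theorem pv_guard (s skip : String) (k j : Int) (hk : 1 ≤ k) (hj : 0 ≤ j)
    (hjk : j + k ≤ PySem.Str.len s) :
    (PySem.Str.isIn skip (PySem.Str.slice s (some j) (some (j + k))) = true) ↔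
    (PySem.List.pyGetD ((List.range (s.toList.length + 1 + 1)).map (fun h => pvCnt s.toList skip.toList h)) j 0 <
     PySem.List.pyGetD ((List.range (s.toList.length + 1 + 1)).map (fun h => pvCnt s.toList skip.toList h))
       (max (j + k - PySem.Str.len skip + 1) j) 0) := by
  set cs := s.toList with hcs
  set N := cs.length with hN
  set M := skip.toList.length with hM'
  have hsl : PySem.Str.len s = (N : Int) := PySem.Str.len_eq s
  have hsk : PySem.Str.len skip = (M : Int) := PySem.Str.len_eq skip
  have hjN : j + k ≤ (N : Int) := by rw [hsl] at hjk; exact hjk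
  by_cases hM0 : M = 0
  · -- skip = ""
    have hskipnil : skip.toList = [] := List.length_eq_zero_iff.mp hM0
    have hmax : max (j + k - PySem.Str.len skip + 1) j = j + k + 1 := by
      rw [hsk, hM0]; push_cast
      rw [max_eq_left (by omega)]; ring
    rw [hmax, pv_pre_get s skip (N + 1) j hj (by push_cast; omega),
        pv_pre_get s skip (N + 1) (j + k + 1) (by omega) (by push_cast; omega)]
    rw [hskipnil, pvCnt_nil, pvCnt_nil]
    constructor
    · intro _; omega
    · intro _
      rw [PySem.Str.isIn_eq, hskipnil, PySem.Chars.isIn_iff_infix]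
      exact List.nil_infix
  · have ht : skip.toList ≠ [] := by
      intro h; exact hM0 (by rw [hM', h]; rfl)
    set a' := PySem.List.clampIdx N j with ha'
    set b' := PySem.List.clampIdx N (j + k) with hb'
    have ha : (a' : Int) = j := by
      rw [ha', PySem.List.clampIdx]; split_ifs <;> omega
    have hb : (b' : Int) = j + k := by
      rw [hb', PySem.List.clampIdx]; split_ifs <;> omega
    have hwin : (PySem.Str.slice s (some j) (some (j + k))).toList = (cs.drop a').take (b' - a') := by
      rw [PySem.Str.slice]
      simp only [String.toList_ofList]
      rfl
    rw [PySem.Str.isIn_eq, hwin, PySem.Chars.isIn_iff_infix,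
        pv_infix_window cs skip.toList ht a' b']
    by_cases hmk : (M : Int) ≤ k
    · have hmax : max (j + k - PySem.Str.len skip + 1) j = j + k - M + 1 := by
        rw [hsk]; rw [max_eq_left (by omega)]
      rw [hmax, pv_pre_get s skip (N + 1) j hj (by push_cast; omega),
          pv_pre_get s skip (N + 1) (j + k - M + 1) (by omega) (by push_cast; omega)]
      rw [pv_cnt_lt_iff cs skip.toList j.toNat (j + k - (M:Int) + 1).toNat (by omega)]
      constructor
      · rintro ⟨p, h1, h2, h3⟩
        exact ⟨p, by omega, by omega, h3⟩
      · rintro ⟨p, h1, h2, h3⟩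
        exact ⟨p, by omega, by omega, h3⟩
    · have hmax : max (j + k - PySem.Str.len skip + 1) j = j := by
        rw [hsk]; exact max_eq_right (by omega)
      rw [hmax]
      constructor
      · rintro ⟨p, h1, h2, _⟩
        omega
      · intro h
        exact absurd h (lt_irrefl _)

-- a loop that SKIPS on a condition is the loop over the filtered list
theorem pv_foldl_skip {α δ : Type} (P : α → Prop) [DecidablePred P] (f : δ → α → δ)
    (l : List α) (init : δ) :
    l.foldl (fun acc x => if P x then acc else f acc x) init
      = (l.filter (fun x => decide ¬ P x)).foldl f init := by
  have h : (fun (acc : δ) (x : α) => if P x then acc else f acc x)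
      = (fun acc x => if ¬ P x then f acc x else acc) := by
    funext acc x; rw [ite_not]
  rw [h, PySem.List.foldl_ite_eq_foldl_filter]

-- the two programs agree whenever k ≥ 1
theorem pv_eq_of_pos (s : String) (k : Int) (skip : String) (at_least : Int)
    (return_sorted : Bool) (rev : Bool) (hk : 1 ≤ k) :
    count_kgrams s k skip at_least return_sorted rev
      = count_kgrams_alt s k skip at_least return_sorted rev := by
  simp only [count_kgrams, count_kgrams_alt, if_neg (show ¬ k < 1 by omega)]
  rw [show PySem.Str.len s + 1 = ((s.toList.length + 1 : Nat) : Int) by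
        rw [PySem.Str.len_eq]; push_cast; ring,
      pv_pre_fold s skip (s.toList.length + 1)]
  rw [pv_foldl_skip]
  rw [← List.foldl_map (f := fun j => PySem.Str.slice s (some j) (some (j + k)))
        (g := fun (d : PySem.Dict String Int) x => d.insert x (d.getD x 0 + 1)),
      PySem.Dict.foldl_insert_getD_add_one_eq_counter]
  have hfil : (PySem.List.pyRange 0 (PySem.Str.len s - k + 1) 1).filter
        (fun j => !(PySem.Str.isIn skip (PySem.Str.slice s (some j) (some (j + k)))))
      = (PySem.List.pyRange 0 (PySem.Str.len s - k + 1) 1).filter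
        (fun j => decide ¬ (PySem.List.pyGetD ((List.range (s.toList.length + 1 + 1)).map (fun h => pvCnt s.toList skip.toList h)) j 0 <
          PySem.List.pyGetD ((List.range (s.toList.length + 1 + 1)).map (fun h => pvCnt s.toList skip.toList h))
            (max (j + k - PySem.Str.len skip + 1) j) 0)) := by
    apply List.filter_congr
    intro j hj
    obtain ⟨h0j, hjlt⟩ := PySem.List.mem_pyRange_one.mp hj
    have hiff := pv_guard s skip k j hk h0j (by omega)
    rw [Bool.eq_iff_iff]
    simp only [Bool.not_eq_true', decide_eq_true_eq]
    rw [← hiff]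
    cases PySem.Str.isIn skip (PySem.Str.slice s (some j) (some (j + k))) <;> simp
  rw [hfil]

-- String.ofList is "" only on []
theorem pv_ofList_eq_empty (l : List Char) : String.ofList l = "" ↔ l = [] := by
  constructor
  · intro h
    have := congrArg String.toList h
    simpa using this
  · intro h; subst h; rfl

-- for k ≤ 0, the window at j is empty unless the stop index wraps into the string
theorem pv_slice_empty_iff (s : String) (k : Int) (hk : k ≤ 0) (jn : Nat) :
    (PySem.Str.slice s (some (jn:Int)) (some ((jn:Int) + k)) = "")
      ↔ ((s.toList.length : Int) + k ≤ 0 ∨ ((-k).toNat ≤ jn)) := by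
  rw [PySem.Str.slice, pv_ofList_eq_empty]
  have hsl : PySem.Chars.slice s.toList (some (jn:Int)) (some ((jn:Int) + k))
      = (s.toList.drop (PySem.List.clampIdx s.toList.length (jn:Int))).take
          (PySem.List.clampIdx s.toList.length ((jn:Int) + k)
            - PySem.List.clampIdx s.toList.length (jn:Int)) := rfl
  rw [hsl, List.take_eq_nil_iff, List.drop_eq_nil_iff]
  simp only [PySem.List.clampIdx]
  split_ifs <;> (constructor <;> intro h <;> omega)

theorem pv_countP_range_ge (c N : Nat) (h : c ≤ N) :
    (List.range N).countP (fun j => decide (c ≤ j)) = N - c := by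
  rw [show N = c + (N - c) by omega, List.range_add, List.countP_append]
  rw [List.countP_eq_zero.mpr (fun x hx => by simp at hx ⊢; omega)]
  rw [List.countP_eq_length.mpr (fun x hx => by
    obtain ⟨y, hy, rfl⟩ := List.mem_map.mp hx; simp)]
  simp

theorem pv_countP_range_lt (c N : Nat) :
    (List.range N).countP (fun j => decide (j < c)) ≤ c := by
  by_cases h : c ≤ N
  · rw [show N = c + (N - c) by omega, List.range_add, List.countP_append]
    rw [List.countP_eq_length.mpr (fun x hx => by simp at hx ⊢; omega)]
    rw [List.countP_eq_zero.mpr (fun x hx => by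
      obtain ⟨y, hy, rfl⟩ := List.mem_map.mp hx; simp)]
    simp
  · calc (List.range N).countP _ ≤ (List.range N).length := List.countP_le_length
    _ ≤ c := by simp; omega

-- the list of kept windows of A's loop, for the proofs about k ≤ 0
def pvL (s : String) (k : Int) (skip : String) : List String :=
  ((PySem.List.pyRange 0 (PySem.Str.len s - k + 1) 1).filter
      (fun j => !(PySem.Str.isIn skip (PySem.Str.slice s (some j) (some (j + k)))))).map
    (fun j => PySem.Str.slice s (some j) (some (j + k)))

theorem pv_isIn_empty_false (skip : String) (hsk : skip ≠ "") :
    PySem.Str.isIn skip "" = false := by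
  rw [PySem.Str.isIn_eq]
  cases h : PySem.Chars.isIn skip.toList "".toList
  · rfl
  · exfalso
    have := (PySem.Chars.isIn_iff_infix _ _).mp h
    have h2 : skip.toList = [] := List.eq_nil_of_infix_nil (by simpa using this)
    have h3 := congrArg String.ofList h2
    rw [String.ofList_toList] at h3
    exact hsk h3

theorem pv_range_cast (s : String) (k : Int) (hk : k ≤ 0) :
    PySem.List.pyRange 0 (PySem.Str.len s - k + 1) 1
      = (List.range (s.toList.length + (-k).toNat + 1)).map (fun i : Nat => (i : Int)) := by
  rw [show PySem.Str.len s - k + 1 = ((s.toList.length + (-k).toNat + 1 : Nat) : Int) by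
        rw [PySem.Str.len_eq]; push_cast; omega]
  exact PySem.List.pyRange_zero_natCast _

-- exact multiplicity of the empty pseudo-window among A's kept windows, k ≤ 0
theorem pv_count_empty (s : String) (k : Int) (skip : String) (hk : k ≤ 0) (hsk : skip ≠ "") :
    ((pvL s k skip).count ""
      = if 0 < (s.toList.length : Int) + k then s.toList.length + 1
        else s.toList.length + (-k).toNat + 1) := by
  set n := s.toList.length with hn
  set c := (-k).toNat with hc
  unfold pvL
  rw [List.count_eq_countP, List.countP_map, List.countP_filter, pv_range_cast s k hk,
      List.countP_map]
  rw [List.countP_congr (q := fun i => decide ((n : Int) + k ≤ 0 ∨ c ≤ i)) ?_]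
  · by_cases hnk : 0 < (n : Int) + k
    · rw [if_pos hnk]
      rw [List.countP_congr (q := fun i => decide (c ≤ i)) (fun i _ => by
        simp only [decide_eq_true_eq]
        omega)]
      rw [pv_countP_range_ge c (n + c + 1) (by omega)]
      omega
    · rw [if_neg hnk]
      rw [List.countP_eq_length.mpr (fun x hx => by simp only [decide_eq_true_eq]; omega),
          List.length_range]
  · intro i _
    simp only [Function.comp, Bool.and_eq_true, Bool.not_eq_true', beq_iff_eq,
      decide_eq_true_eq]
    constructor
    · rintro ⟨hemp, -⟩
      exact (pv_slice_empty_iff s k hk i).mp hemp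
    · intro hcond
      have hemp := (pv_slice_empty_iff s k hk i).mpr hcond
      exact ⟨hemp, by rw [hemp]; exact pv_isIn_empty_false skip hsk⟩

-- any other key occurs at most (-k) times, k ≤ 0
theorem pv_count_ne (s : String) (k : Int) (skip : String) (hk : k ≤ 0) (g : String)
    (hg : g ≠ "") : (pvL s k skip).count g ≤ (-k).toNat := by
  set n := s.toList.length with hn
  set c := (-k).toNat with hc
  unfold pvL
  rw [List.count_eq_countP, List.countP_map, List.countP_filter, pv_range_cast s k hk,
      List.countP_map]
  calc _ ≤ (List.range (n + c + 1)).countP (fun i => decide (i < c)) := by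
        apply List.countP_mono_left
        intro i _ hp
        simp only [Function.comp, Bool.and_eq_true, beq_iff_eq, decide_eq_true_eq] at hp ⊢
        obtain ⟨hfg, -⟩ := hp
        by_contra hlt
        have : PySem.Str.slice s (some (i:Int)) (some ((i:Int) + k)) = "" := by
          apply (pv_slice_empty_iff s k hk i).mpr
          right; omega
        exact hg (by rw [← hfg, this])
    _ ≤ c := pv_countP_range_lt c _

-- for k ≤ 0 with no window reaching into the string, every kept window is the empty string
theorem pv_mem_eq_empty (s : String) (k : Int) (skip : String) (hk : k ≤ 0)
    (hnk : (s.toList.length : Int) + k ≤ 0) (g : String) (hg : g ∈ pvL s k skip) : g = "" := by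
  unfold pvL at hg
  obtain ⟨j, hj, rfl⟩ := List.mem_map.mp hg
  have hj' := List.mem_filter.mp hj
  obtain ⟨h0j, -⟩ := PySem.List.mem_pyRange_one.mp hj'.1
  have : ((j.toNat : Int)) = j := by omega
  rw [← this]
  exact (pv_slice_empty_iff s k hk j.toNat).mpr (Or.inl hnk)

-- A's result, written over pvL
theorem pv_A_eq (s : String) (k : Int) (skip : String) (at_least : Int)
    (return_sorted : Bool) (rev : Bool) :
    count_kgrams s k skip at_least return_sorted rev
      = (if return_sorted
          then PySem.List.sorted ((PySem.Dict.counter (pvL s k skip)).items.filter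
                 (fun p => decide (at_least ≤ p.2))) (fun p => p.2) rev
          else (PySem.Dict.counter (pvL s k skip)).items.filter
                 (fun p => decide (at_least ≤ p.2))) := rfl

-- A returns [] on every input with k ≤ 0 outside D_
theorem pv_nil_of_nonpos (s : String) (k : Int) (skip : String) (at_least : Int)
    (return_sorted : Bool) (rev : Bool) (hk : k ≤ 0)
    (hD : ¬ D_count_kgrams s k skip at_least return_sorted rev) :
    count_kgrams s k skip at_least return_sorted rev = [] := by
  rw [pv_A_eq]
  by_cases hsk : skip = ""
  · subst hsk
    have hL : pvL s k "" = [] := by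
      unfold pvL
      rw [List.filter_eq_nil_iff.mpr (fun j _ => by
        simp only [Bool.not_eq_true', Bool.not_eq_false]
        rw [PySem.Str.isIn_eq]
        exact (PySem.Chars.isIn_iff_infix _ _).mpr (by simp [List.nil_infix]))]
      rfl
    rw [hL]
    cases return_sorted <;> rfl
  · have harith : ¬ ((0 < PySem.Str.len s + k ∧ at_least ≤ PySem.Str.len s + 1) ∨
        (PySem.Str.len s + k ≤ 0 ∧ at_least ≤ PySem.Str.len s - k + 1)) := by
      intro h
      exact hD ⟨hk, hsk, h⟩
    rw [PySem.Str.len_eq] at harith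
    set n := s.toList.length with hn
    have hkg : (PySem.Dict.counter (pvL s k skip)).items.filter
        (fun p => decide (at_least ≤ p.2)) = [] := by
      apply List.filter_eq_nil_iff.mpr
      intro p hp
      rw [PySem.Dict.items_counter] at hp
      obtain ⟨g, hg, rfl⟩ := List.mem_map.mp hp
      have hgL : g ∈ pvL s k skip := (PySem.Set.mem_ofList _ _).mp hg
      simp only [decide_eq_true_eq]
      by_cases hnk : 0 < (n : Int) + k
      · by_cases hge : g = ""
        · subst hge
          have := pv_count_empty s k skip hk hsk
          rw [if_pos hnk] at this
          rw [this]
          push_cast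
          omega
        · have := pv_count_ne s k skip hk g hge
          omega
      · have hge : g = "" := pv_mem_eq_empty s k skip hk (by omega) g hgL
        subst hge
        have := pv_count_empty s k skip hk hsk
        rw [if_neg hnk] at this
        rw [this]
        push_cast
        omega
    rw [hkg]
    cases return_sorted
    · rfl
    · simp only [if_true]
      exact (PySem.List.sorted_eq_nil_iff _ _ _).mpr rfl

-- inside D_, A's result contains the empty-string pseudo-gram, so it is nonempty
theorem pv_ne_nil_of_D (s : String) (k : Int) (skip : String) (at_least : Int)
    (return_sorted : Bool) (rev : Bool)
    (hD : D_count_kgrams s k skip at_least return_sorted rev) :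
    count_kgrams s k skip at_least return_sorted rev ≠ [] := by
  obtain ⟨hk, hsk, hb⟩ := hD
  rw [PySem.Str.len_eq] at hb
  set n := s.toList.length with hn
  rw [pv_A_eq]
  have hcnt := pv_count_empty s k skip hk hsk
  have hpos : 0 < (pvL s k skip).count "" := by
    split_ifs at hcnt <;> omega
  have hmem : ("" : String) ∈ pvL s k skip := List.count_pos_iff.mp hpos
  have hitem : (("" : String), ((pvL s k skip).count "" : Int))
      ∈ (PySem.Dict.counter (pvL s k skip)).items := by
    rw [PySem.Dict.items_counter]
    exact List.mem_map.mpr ⟨"", (PySem.Set.mem_ofList _ _).mpr hmem, rfl⟩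
  have hkeep : (("" : String), ((pvL s k skip).count "" : Int))
      ∈ (PySem.Dict.counter (pvL s k skip)).items.filter (fun p => decide (at_least ≤ p.2)) := by
    apply List.mem_filter.mpr
    refine ⟨hitem, ?_⟩
    simp only [decide_eq_true_eq]
    split_ifs at hcnt with hnk
    · rw [hcnt]; push_cast; omega
    · rw [hcnt]; push_cast; omega
  cases return_sorted
  · simp only [Bool.false_eq_true, if_false]
    exact List.ne_nil_of_mem hkeep
  · simp only [if_true]
    intro hnil
    have := (PySem.List.sorted_eq_nil_iff _ _ _).mp hnil
    rw [this] at hkeep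
    exact absurd hkeep (List.not_mem_nil)

-- ===== VERDICT (by name: the statement is the Claim_ definition above) =====
theorem count_kgrams_spec : Claim_unchanged_count_kgrams := by
  intro s k skip at_least return_sorted rev _ hD
  by_cases hk : 1 ≤ k
  · exact pv_eq_of_pos s k skip at_least return_sorted rev hk
  · rw [pv_nil_of_nonpos s k skip at_least return_sorted rev (by omega) hD,
        count_kgrams_alt, if_pos (by omega)]

theorem count_kgrams_changed : Claim_changed_count_kgrams := by
  unfold Claim_changed_count_kgrams; decide

theorem count_kgrams_tight : Claim_exact_count_kgrams := by
  intro s k skip at_least return_sorted rev _ hD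
  have hk : k ≤ 0 := hD.1
  rw [count_kgrams_alt, if_pos (by omega)]
  exact pv_ne_nil_of_D s k skip at_least return_sorted rev hD
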